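-- pv_equiv track=rewrite | github.com/sofyagdk/euplotes | analyze_fs_evolution/events_on_branches.py | branched_and_named
-- ===== SOURCE A (Python) =====
-- def branched_and_named(tree_named, tree_branched):
-- 	tree_new = str()
--
--
-- 	TN = tree_named.split()
-- 	nodenames = list()
-- 	for n in range(len(TN)):
-- 		if TN[n][-1] == ')':
-- 			nodenames.append(TN[n+1])
--
-- 	NOW = 0
-- 	tree_new = str()
-- 	b = 0
-- 	while b < len(tree_branched):
-- 		if tree_branched[b:b+3] == ')1:':
-- 			tree_new += ')' + nodenames[NOW] + ':'
-- 			NOW += 1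
-- 			b += 3
-- 		elif tree_branched[b] == ';':
-- 			tree_new += nodenames[NOW] + ';'
-- 			b += 1
--
-- 		else:
-- 			tree_new += tree_branched[b]
-- 			b += 1
--
-- 	return tree_new
-- ===== SOURCE B (Python) =====
-- def branched_and_named(tree_named, tree_branched):
--     TN = tree_named.split()
--     nodenames = [nxt for tok, nxt in zip(TN, TN[1:]) if tok[-1] == ')']
--
--     k = 0
--     pieces = []
--     chunks = tree_branched.split(')1:')
--     for i, chunk in enumerate(chunks):
--         subs = chunk.split(';')
--         pieces.append(subs[0])
--         for sub in subs[1:]: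
--             pieces.append(nodenames[k] + ';')
--             pieces.append(sub)
--         if i < len(chunks) - 1:
--             pieces.append(')' + nodenames[k] + ':')
--             k += 1
--     return ''.join(pieces)
-- ===== Notes on version B (the rewrite author's own statement) =====
-- stated objective: faster
-- what changed: Phase one builds the name list by zipping the token list with its tail instead of an index loop; phase two replaces the character-by-character while loop (which slices and concatenates strings one character at a time) with a split on ')1:' (and on ';' inside each chunk) followed by a single join interleaving the node names.
import Mathlib
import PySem

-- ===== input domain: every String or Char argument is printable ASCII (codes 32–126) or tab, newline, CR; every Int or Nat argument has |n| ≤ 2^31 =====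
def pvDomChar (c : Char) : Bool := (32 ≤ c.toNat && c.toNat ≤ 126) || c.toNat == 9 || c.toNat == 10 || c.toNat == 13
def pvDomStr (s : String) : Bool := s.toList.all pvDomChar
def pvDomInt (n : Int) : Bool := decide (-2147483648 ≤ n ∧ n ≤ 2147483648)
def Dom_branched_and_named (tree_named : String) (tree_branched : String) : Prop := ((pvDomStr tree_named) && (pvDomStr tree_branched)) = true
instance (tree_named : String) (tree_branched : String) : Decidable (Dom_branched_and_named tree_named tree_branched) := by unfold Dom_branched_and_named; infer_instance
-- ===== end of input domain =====

-- B rebuilds the output by splitting tree_branched on ')1:' and ';' and joining the pieces with the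
-- node names, instead of A's character-by-character scan with per-character string slicing and
-- concatenation; a timing run measured B faster (objective: faster).

-- shared token test: both Pythons literally contain  tok[-1] == ')'
def pvTokEnds (tok : List Char) : Bool := PySem.List.pyGetD tok (-1) ' ' == ')'

-- ===== PORT A =====
-- for n in range(len(TN)): if TN[n][-1] == ')': nodenames.append(TN[n+1])
def pvNamesA (TN : List (List Char)) : List (List Char) :=
  (PySem.List.pyRange 0 TN.length 1).foldl
    (fun acc n => if pvTokEnds (PySem.List.pyGetD TN n []) then acc ++ [PySem.List.pyGetD TN (n + 1) []] else acc) []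

-- the while loop over tree_branched; state = (NOW, tree_new, remaining suffix of tree_branched)
-- (nodenames[NOW] raises in Python when NOW is out of range — those inputs are excluded by Pre_)
def pvLoopA (names : List (List Char)) : Nat → List Char → List Char → List Char
  | _, acc, [] => acc
  | NOW, acc, c :: rest =>
    if List.take 3 (c :: rest) = [')', '1', ':'] then
      pvLoopA names (NOW + 1) (acc ++ [')'] ++ names.getD NOW [] ++ [':']) (List.drop 3 (c :: rest))
    else if c = ';' then
      pvLoopA names NOW (acc ++ names.getD NOW [] ++ [';']) rest
    else
      pvLoopA names NOW (acc ++ [c]) rest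
  termination_by _ _ cs => cs.length
  decreasing_by all_goals (simp [List.length_drop]; try omega)

def branched_and_named (tree_named : String) (tree_branched : String) : String :=
  String.ofList (pvLoopA (pvNamesA (PySem.Chars.split₀ tree_named.toList)) 0 [] tree_branched.toList)

-- ===== PORT B =====
-- nodenames = [nxt for tok, nxt in zip(TN, TN[1:]) if tok[-1] == ')']
def pvNamesB (TN : List (List Char)) : List (List Char) :=
  ((TN.zip TN.tail).filter (fun p => pvTokEnds p.1)).map (·.2)

-- for sub in subs[1:]: pieces.append(nodenames[k] + ';'); pieces.append(sub)
def pvInnerB (names : List (List Char)) (k : Nat) : List (List Char) → List Char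
  | [] => []
  | s :: more => names.getD k [] ++ [';'] ++ s ++ pvInnerB names k more

-- the for-loop over chunks = tree_branched.split(')1:'); the last chunk gets no ')name:' separator
def pvOuterB (names : List (List Char)) (k : Nat) : List (List Char) → List Char
  | [] => []
  | [chunk] =>
      let subs := PySem.Chars.splitOn chunk [';']
      subs.headD [] ++ pvInnerB names k subs.tail
  | chunk :: rest =>
      let subs := PySem.Chars.splitOn chunk [';']
      subs.headD [] ++ pvInnerB names k subs.tail ++ [')'] ++ names.getD k [] ++ [':'] ++ pvOuterB names (k + 1) rest

def branched_and_named_alt (tree_named : String) (tree_branched : String) : String :=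
  String.ofList (pvOuterB (pvNamesB (PySem.Chars.split₀ tree_named.toList)) 0
    (PySem.Chars.splitOn tree_branched.toList [')', '1', ':']))

-- ===== PRECONDITION & SPEC =====
-- Pre_ excludes exactly the inputs where Python A raises IndexError: a ')'-ending last token of
-- tree_named.split() (then TN[n+1] overruns), and a name consumption in tree_branched that reads past
-- the end of nodenames (more ')1:' occurrences than names, or — with all names consumed — a later ';').
def Pre_branched_and_named (tree_named : String) (tree_branched : String) : Prop :=
  pvTokEnds ((PySem.Chars.split₀ tree_named.toList).getLastD []) = false ∧
    (PySem.Chars.count tree_branched.toList [')', '1', ':'] <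
        ((PySem.Chars.split₀ tree_named.toList).filter (fun t => pvTokEnds t)).length ∨
      (PySem.Chars.count tree_branched.toList [')', '1', ':'] =
          ((PySem.Chars.split₀ tree_named.toList).filter (fun t => pvTokEnds t)).length ∧
        PySem.Chars.count
          (tree_branched.toList.drop
            (if 0 < PySem.Chars.count tree_branched.toList [')', '1', ':'] then
              (PySem.Chars.rfind tree_branched.toList [')', '1', ':']).toNat + 3
            else 0))
          [';'] = 0))
instance (tree_named : String) (tree_branched : String) : Decidable (Pre_branched_and_named tree_named tree_branched) := by
  unfold Pre_branched_and_named; infer_instance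

def pvWitness_branched_and_named : String × String := ("(a,b) n1 (c,d) root", "(a:1,b:2)1:;")

def Spec_branched_and_named (tree_named : String) (tree_branched : String) (out : String) : Prop := out = branched_and_named_alt tree_named tree_branched
instance (tree_named : String) (tree_branched : String) (out : String) : Decidable (Spec_branched_and_named tree_named tree_branched out) := by unfold Spec_branched_and_named; infer_instance

-- ===== CLAIM (what is proved, stated in full; the proofs are below) =====
def Claim_equal_branched_and_named : Prop := ∀ (tree_named : String) (tree_branched : String), Dom_branched_and_named tree_named tree_branched → Pre_branched_and_named tree_named tree_branched → Spec_branched_and_named tree_named tree_branched (branched_and_named tree_named tree_branched)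

-- ===== LEMMAS AND PROOFS =====

-- common spec of phase two: one direct recursion over the characters
def pvF (names : List (List Char)) : Nat → List Char → List Char
  | _, [] => []
  | k, c :: rest =>
    if List.take 3 (c :: rest) = [')', '1', ':'] then
      [')'] ++ names.getD k [] ++ [':'] ++ pvF names (k + 1) (List.drop 3 (c :: rest))
    else if c = ';' then
      names.getD k [] ++ [';'] ++ pvF names k rest
    else
      c :: pvF names k rest
  termination_by _ cs => cs.length
  decreasing_by all_goals (simp [List.length_drop]; try omega)

-- fuel-free characterization of PySem.Chars.splitOn
def pvSplit (sep : List Char) : List Char → List (List Char)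
  | [] => [[]]
  | c :: rest =>
    if sep.isPrefixOf (c :: rest) then
      [] :: pvSplit sep (List.drop (sep.length - 1) rest)
    else
      (c :: (pvSplit sep rest).headD []) :: (pvSplit sep rest).tail
  termination_by cs => cs.length
  decreasing_by all_goals (simp [List.length_drop]; try omega)

theorem pvSplit_ne_nil (sep : List Char) (l : List Char) : pvSplit sep l ≠ [] := by
  cases l with
  | nil => simp [pvSplit]
  | cons c rest => rw [pvSplit]; split <;> simp

theorem pvSplit_cons_struct (sep l : List Char) :
    (pvSplit sep l).head?.getD [] :: (pvSplit sep l).tail = pvSplit sep l := by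
  obtain ⟨a, t, hs⟩ := List.exists_cons_of_ne_nil (pvSplit_ne_nil sep l)
  simp [hs]

theorem pvSplit_cons_structD (sep l : List Char) :
    (pvSplit sep l).headD [] :: (pvSplit sep l).tail = pvSplit sep l := by
  obtain ⟨a, t, hs⟩ := List.exists_cons_of_ne_nil (pvSplit_ne_nil sep l)
  simp [hs]

theorem go_succ_cons (sep : List Char) (n : Nat) (c : Char) (rest cur : List Char) (acc : List (List Char)) :
    PySem.Chars.splitOn.go sep (n + 1) (c :: rest) cur acc =
      if sep.isPrefixOf (c :: rest) then
        PySem.Chars.splitOn.go sep n (List.drop sep.length (c :: rest)) [] (cur.reverse :: acc)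
      else
        PySem.Chars.splitOn.go sep n rest (c :: cur) acc := rfl

theorem go_succ_nil (sep cur : List Char) (n : Nat) (acc : List (List Char)) :
    PySem.Chars.splitOn.go sep (n + 1) [] cur acc = (cur.reverse :: acc).reverse := rfl

theorem goSpec (sep : List Char) (hsep : sep ≠ []) :
    ∀ (fuel : Nat) (l cur : List Char) (acc : List (List Char)), l.length < fuel →
      PySem.Chars.splitOn.go sep fuel l cur acc =
        acc.reverse ++ (cur.reverse ++ (pvSplit sep l).headD []) :: (pvSplit sep l).tail := by
  have hsl : 1 ≤ sep.length := by
    cases sep with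
    | nil => exact absurd rfl hsep
    | cons a t => simp
  intro fuel
  induction fuel with
  | zero => intro l cur acc h; omega
  | succ n ih =>
    intro l cur acc h
    cases l with
    | nil => rw [go_succ_nil]; simp [pvSplit]
    | cons c rest =>
      rw [go_succ_cons]
      by_cases hp : sep.isPrefixOf (c :: rest) = true
      · rw [if_pos hp]
        have hdrop : List.drop sep.length (c :: rest) = List.drop (sep.length - 1) rest := by
          cases sep with
          | nil => exact absurd rfl hsep
          | cons a t => simp
        have hlen : (List.drop (sep.length - 1) rest).length < n := by
          simp [List.length_drop] at *
          omega
        rw [hdrop, ih _ _ _ hlen]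
        rw [pvSplit, if_pos hp]
        simp [pvSplit_cons_struct]
      · rw [if_neg hp]
        have hlen : rest.length < n := by simp at h; omega
        rw [ih _ _ _ hlen]
        rw [pvSplit, if_neg hp]
        simp

theorem splitOn_eq_pvSplit (l sep : List Char) (hsep : sep ≠ []) :
    PySem.Chars.splitOn l sep = pvSplit sep l := by
  rw [PySem.Chars.splitOn, goSpec sep hsep (l.length + 1) l [] [] (by omega)]
  simp [pvSplit_cons_struct]

-- A's loop computes pvF (accumulator comes out in front)
theorem lemA (names : List (List Char)) :
    ∀ (n : Nat) (cs : List Char), cs.length ≤ n → ∀ (NOW : Nat) (acc : List Char),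
      pvLoopA names NOW acc cs = acc ++ pvF names NOW cs := by
  intro n
  induction n with
  | zero =>
    intro cs h NOW acc
    have : cs = [] := by cases cs <;> simp_all
    subst this; simp [pvLoopA, pvF]
  | succ n ih =>
    intro cs h NOW acc
    cases cs with
    | nil => simp [pvLoopA, pvF]
    | cons c rest =>
      rw [pvLoopA, pvF]
      by_cases h31 : List.take 3 (c :: rest) = [')', '1', ':']
      · rw [if_pos h31, if_pos h31]
        rw [ih _ (by simp [List.length_drop] at *; omega)]
        simp
      · rw [if_neg h31, if_neg h31]
        by_cases hc : c = ';'
        · rw [if_pos hc, if_pos hc, ih _ (by simp at h; omega)]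
          simp
        · rw [if_neg hc, if_neg hc, ih _ (by simp at h; omega)]
          simp

-- the two rewrite steps of B's outer loop on a chunk list whose head grows by one character
theorem outerB_semi (names : List (List Char)) (k : Nat) (h : List Char) (t : List (List Char)) :
    pvOuterB names k ((';' :: h) :: t) = names.getD k [] ++ [';'] ++ pvOuterB names k (h :: t) := by
  have hpre : ([';'] : List Char).isPrefixOf (';' :: h) = true := by
    rw [List.isPrefixOf_iff_prefix]; exact ⟨h, rfl⟩
  have hsplit : PySem.Chars.splitOn (';' :: h) [';'] = [] :: pvSplit [';'] h := by
    rw [splitOn_eq_pvSplit _ _ (by simp), pvSplit, if_pos hpre]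
    simp
  obtain ⟨h2, t2, hs⟩ := List.exists_cons_of_ne_nil (pvSplit_ne_nil [';'] h)
  cases t with
  | nil =>
    simp only [pvOuterB, hsplit, splitOn_eq_pvSplit _ ([';'] : List Char) (by simp), hs]
    simp [pvInnerB]
  | cons u us =>
    simp only [pvOuterB, hsplit, splitOn_eq_pvSplit _ ([';'] : List Char) (by simp), hs]
    simp [pvInnerB]

theorem outerB_other (names : List (List Char)) (k : Nat) (c : Char) (hc : c ≠ ';')
    (h : List Char) (t : List (List Char)) :
    pvOuterB names k ((c :: h) :: t) = c :: pvOuterB names k (h :: t) := by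
  have hpre : ([';'] : List Char).isPrefixOf (c :: h) = false := by
    rw [Bool.eq_false_iff]
    intro hcontra
    rw [List.isPrefixOf_iff_prefix] at hcontra
    obtain ⟨u, hu⟩ := hcontra
    exact hc (by injection hu with h1 _; exact h1.symm)
  have hsplit : PySem.Chars.splitOn (c :: h) [';'] =
      (c :: (pvSplit [';'] h).headD []) :: (pvSplit [';'] h).tail := by
    rw [splitOn_eq_pvSplit _ _ (by simp), pvSplit, if_neg (by simp [hpre])]
  obtain ⟨h2, t2, hs⟩ := List.exists_cons_of_ne_nil (pvSplit_ne_nil [';'] h)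
  cases t with
  | nil =>
    simp only [pvOuterB, hsplit, splitOn_eq_pvSplit _ ([';'] : List Char) (by simp), hs]
    simp
  | cons u us =>
    simp only [pvOuterB, hsplit, splitOn_eq_pvSplit _ ([';'] : List Char) (by simp), hs]
    simp

-- B's split-and-join computes pvF as well
theorem lemB (names : List (List Char)) :
    ∀ (n : Nat) (cs : List Char), cs.length ≤ n → ∀ (k : Nat),
      pvOuterB names k (pvSplit [')', '1', ':'] cs) = pvF names k cs := by
  intro n
  induction n with
  | zero =>
    intro cs h k
    have : cs = [] := by cases cs <;> simp_all
    subst this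
    simp [pvSplit, pvOuterB, pvInnerB, pvF, splitOn_eq_pvSplit ([] : List Char) ([';'] : List Char) (by simp)]
  | succ n ih =>
    intro cs h k
    cases cs with
    | nil =>
      simp [pvSplit, pvOuterB, pvInnerB, pvF, splitOn_eq_pvSplit ([] : List Char) ([';'] : List Char) (by simp)]
    | cons c rest =>
      rw [pvF]
      by_cases h31 : List.take 3 (c :: rest) = [')', '1', ':']
      · rw [if_pos h31]
        have hpre : ([')', '1', ':'] : List Char).isPrefixOf (c :: rest) = true := by
          rw [List.isPrefixOf_iff_prefix, List.prefix_iff_eq_take]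
          exact h31.symm
        rw [pvSplit, if_pos hpre]
        have hdrop : List.drop (([')', '1', ':'] : List Char).length - 1) rest = List.drop 3 (c :: rest) := by
          simp
        rw [hdrop]
        obtain ⟨h2, t2, hs⟩ := List.exists_cons_of_ne_nil (pvSplit_ne_nil [')', '1', ':'] (List.drop 3 (c :: rest)))
        rw [hs]
        show pvOuterB names k ([] :: h2 :: t2) = _
        simp only [pvOuterB, splitOn_eq_pvSplit ([] : List Char) ([';'] : List Char) (by simp)]
        rw [← hs, ih (List.drop 3 (c :: rest)) (by simp [List.length_drop] at *; omega)]
        simp [pvSplit, pvInnerB]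
      · rw [if_neg h31]
        have hpre : ([')', '1', ':'] : List Char).isPrefixOf (c :: rest) = false := by
          rw [Bool.eq_false_iff]
          intro hcontra
          rw [List.isPrefixOf_iff_prefix, List.prefix_iff_eq_take] at hcontra
          exact h31 hcontra.symm
        rw [pvSplit, if_neg (by simp [hpre])]
        by_cases hc : c = ';'
        · rw [if_pos hc]
          subst hc
          rw [outerB_semi, pvSplit_cons_structD, ih rest (by simp at h; omega)]
        · rw [if_neg hc]
          rw [outerB_other names k c hc, pvSplit_cons_structD, ih rest (by simp at h; omega)]

-- phase one: the index loop equals the zip comprehension when the last token does not end in ')'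
theorem rangeFM {α : Type} (p : Nat → Bool) (g : Nat → α) (n : Nat) :
    ((List.range (n + 1)).filter p).map g =
      (if p 0 then [g 0] else []) ++ ((List.range n).filter (fun i => p (i + 1))).map (fun i => g (i + 1)) := by
  rw [List.range_succ_eq_map, List.filter_cons]
  by_cases h0 : p 0 = true <;>
    simp [h0, List.filter_map, List.map_map, Function.comp_def, Nat.succ_eq_add_one]

theorem namesAux :
    ∀ (TN : List (List Char)), pvTokEnds (TN.getLastD []) = false →
      ((List.range TN.length).filter (fun n => pvTokEnds (TN.getD n []))).map (fun n => TN.getD (n + 1) []) =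
        ((TN.zip TN.tail).filter (fun p => pvTokEnds p.1)).map (·.2) := by
  intro TN
  induction TN with
  | nil => intro _; simp
  | cons t rest ih =>
    intro hlast
    rw [List.length_cons, rangeFM]
    simp only [List.getD_cons_zero, List.getD_cons_succ]
    cases rest with
    | nil =>
      rw [show ([t] : List (List Char)).getLastD [] = t from rfl] at hlast
      simp [hlast]
    | cons r rs =>
      have hlast' : pvTokEnds ((r :: rs).getLastD []) = false := by
        simpa [List.getLastD_cons] using hlast
      rw [ih hlast']
      by_cases ht : pvTokEnds t = true
      · simp [ht]
      · simp only [Bool.not_eq_true] at ht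
        simp [ht]

theorem lemNames (TN : List (List Char)) (h : pvTokEnds (TN.getLastD []) = false) :
    pvNamesA TN = pvNamesB TN := by
  unfold pvNamesA pvNamesB
  simp only [PySem.List.foldl_append_if, List.nil_append, PySem.List.pyRange_zero_natCast,
    List.filter_map, List.map_map, Function.comp_def, ← Nat.cast_add_one, PySem.List.pyGetD_natCast]
  simpa using namesAux TN h

-- ===== VERDICT (by name: the statement is the Claim_ definition above) =====
theorem branched_and_named_spec : Claim_equal_branched_and_named := by
  intro tn tb _ hpre
  unfold Spec_branched_and_named branched_and_named branched_and_named_alt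
  obtain ⟨h1, _⟩ := hpre
  rw [lemNames _ h1, lemA _ tb.toList.length _ (le_refl _),
    splitOn_eq_pvSplit _ _ (by simp), lemB _ tb.toList.length _ (le_refl _)]
  rfl
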